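-- pv_equiv track=rewrite | github.com/MIVAA-ai/mivaa-graphrag-assistant-v3 | universal_asset_patterns.py | _detect_inventory_question
-- ===== SOURCE A (Python) =====
-- def _detect_inventory_question(question: str) -> bool:
--     """Detect inventory/stock questions"""
--     question_lower = question.lower()
--
--     inventory_indicators = [
--         'stock', 'inventory', 'quantity', 'parts', 'spare', 'material',
--         'warehouse', 'storage', 'supply', 'available', 'in stock',
--         'stock level', 'quantity on hand'
--     ]
--
--     return any(indicator in question_lower for indicator in inventory_indicators)
-- ===== SOURCE B (Python) =====
-- # One left-to-right scan over the question checking, at each position, whether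
-- # one of the irreducible keywords starts there (the three multi-word keywords
-- # of A are substrings-supersets of single keywords, so they are dropped).
-- _KEYWORDS = ('stock', 'inventory', 'quantity', 'parts', 'spare', 'material',
--              'warehouse', 'storage', 'supply', 'available')
--
-- def _detect_inventory_question(question: str) -> bool:
--     q = question.lower()
--     return any(q.startswith(w, i) for i in range(len(q)) for w in _KEYWORDS)
-- ===== Notes on version B (the rewrite author's own statement) =====
-- stated objective: alternative
-- what changed: Replaces 13 independent substring searches with a single left-to-right scan that tests, at each position, whether one of 10 irreducible keywords starts there (the three multi-word keywords are dropped because each contains a single keyword as a substring).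
import Mathlib
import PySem

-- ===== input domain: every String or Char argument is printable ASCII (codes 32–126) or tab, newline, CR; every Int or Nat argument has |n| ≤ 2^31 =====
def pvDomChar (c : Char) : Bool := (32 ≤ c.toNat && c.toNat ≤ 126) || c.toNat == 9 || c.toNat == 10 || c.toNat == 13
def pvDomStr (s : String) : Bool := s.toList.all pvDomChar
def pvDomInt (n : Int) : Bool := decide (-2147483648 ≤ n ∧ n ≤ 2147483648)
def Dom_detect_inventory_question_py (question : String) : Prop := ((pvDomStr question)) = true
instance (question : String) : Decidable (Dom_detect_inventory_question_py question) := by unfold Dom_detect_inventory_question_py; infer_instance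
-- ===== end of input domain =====

-- B replaces A's 13 independent substring searches by a single left-to-right
-- scan testing at each position whether one of 10 irreducible keywords starts
-- there (alternative decomposition; same boolean result).


-- ===== PORT A =====
def detect_inventory_question_py (question : String) : Bool :=
  let question_lower := PySem.Str.lower question
  let inventory_indicators : List String :=
    ["stock", "inventory", "quantity", "parts", "spare", "material",
     "warehouse", "storage", "supply", "available", "in stock",
     "stock level", "quantity on hand"]
  inventory_indicators.any (fun indicator => PySem.Str.isIn indicator question_lower)

-- ===== PORT B =====
def altKeywords : List (List Char) :=
  ["stock".toList, "inventory".toList, "quantity".toList, "parts".toList,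
   "spare".toList, "material".toList, "warehouse".toList, "storage".toList,
   "supply".toList, "available".toList]

-- the single scan: for each position i (each suffix), does some keyword start there?
def altScan : List Char → Bool
  | [] => false
  | c :: rest =>
      altKeywords.any (fun w => PySem.Chars.startswith (c :: rest) w) || altScan rest

def detect_inventory_question_py_alt (question : String) : Bool :=
  let q := PySem.Str.lower question
  altScan q.toList

-- ===== PRECONDITION & SPEC =====
def Spec_detect_inventory_question_py (question : String) (out : Bool) : Prop := out = detect_inventory_question_py_alt question
instance (question : String) (out : Bool) : Decidable (Spec_detect_inventory_question_py question out) := by unfold Spec_detect_inventory_question_py; infer_instance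

-- ===== CLAIM (what is proved, stated in full; the proofs are below) =====
def Claim_equal_detect_inventory_question_py : Prop := ∀ (question : String), Dom_detect_inventory_question_py question → Spec_detect_inventory_question_py question (detect_inventory_question_py question)

-- ===== LEMMAS AND PROOFS =====

-- the scan finds exactly the keywords occurring as a substring
theorem altScan_iff (s : List Char) :
    altScan s = true ↔ ∃ w ∈ altKeywords, PySem.Chars.isIn w s = true := by
  induction s with
  | nil =>
      simp only [altScan]
      constructor
      · intro h; exact absurd h (by simp)
      · rintro ⟨w, hw, hin⟩
        have : w <:+: ([] : List Char) := (PySem.Chars.isIn_iff_infix _ _).mp hin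
        have hnil : w = [] := List.eq_nil_of_infix_nil this
        subst hnil
        revert hw; decide
  | cons c rest ih =>
      simp only [altScan, Bool.or_eq_true, List.any_eq_true, ih]
      constructor
      · rintro (⟨w, hw, hsw⟩ | ⟨w, hw, hin⟩)
        · refine ⟨w, hw, ?_⟩
          have : w <+: (c :: rest) := (PySem.Chars.startswith_iff _ _).mp hsw
          exact (PySem.Chars.isIn_iff_infix _ _).mpr this.isInfix
        · refine ⟨w, hw, ?_⟩
          have : w <:+: rest := (PySem.Chars.isIn_iff_infix _ _).mp hin
          exact (PySem.Chars.isIn_iff_infix _ _).mpr (this.trans (List.suffix_cons c rest).isInfix)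
      · rintro ⟨w, hw, hin⟩
        have : w <:+: (c :: rest) := (PySem.Chars.isIn_iff_infix _ _).mp hin
        rcases List.infix_cons_iff.mp this with hpre | hrest
        · exact Or.inl ⟨w, hw, (PySem.Chars.startswith_iff _ _).mpr hpre⟩
        · exact Or.inr ⟨w, hw, (PySem.Chars.isIn_iff_infix _ _).mpr hrest⟩

-- an occurrence of a longer keyword yields one of its substring keyword
theorem isIn_of_sub {u v : List Char} (s : List Char) (h : u <:+: v)
    (hv : PySem.Chars.isIn v s = true) : PySem.Chars.isIn u s = true :=
  (PySem.Chars.isIn_iff_infix _ _).mpr (h.trans ((PySem.Chars.isIn_iff_infix _ _).mp hv))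

-- ===== VERDICT (by name: the statement is the Claim_ definition above) =====
theorem detect_inventory_question_py_spec : Claim_equal_detect_inventory_question_py := by
  intro question _
  unfold Spec_detect_inventory_question_py
  unfold detect_inventory_question_py detect_inventory_question_py_alt
  rw [Bool.eq_iff_iff]
  rw [altScan_iff]
  simp only [List.any_eq_true, PySem.Str.isIn_eq]
  constructor
  · rintro ⟨ind, hind, hin⟩
    fin_cases hind <;>
      first
        | exact ⟨_, by decide, hin⟩
        | exact ⟨"stock".toList, by decide, isIn_of_sub _ (by decide) hin⟩
        | exact ⟨"quantity".toList, by decide, isIn_of_sub _ (by decide) hin⟩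
  · rintro ⟨w, hw, hin⟩
    fin_cases hw <;> exact ⟨_, by decide, hin⟩
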